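-- pv_equiv track=rewrite | github.com/DRobinson4105/calculator | latexConverter.py | convertLogarithms
-- ===== SOURCE A (Python) =====
-- log = ['l', 'o', 'g']
--
-- def convertLogarithms(text):
--     prev = text.copy()
--     curr = 0
--     length = len(text)
--
--     while curr < length:
--         try:
--             if curr + 2 < length and text[curr:curr+3] == log:
--                 # If the user has only typed log, display log
--                 if curr + 3 == length:
--                     return text
--
--                 # Add '\' before and '{' after the sqrt
--                 text.insert(curr, '\\')
--                 text.insert(curr + 4, '{')
--                 length += 2
--
--                 # Track the number of open sets of parenthesis at tmp
--                 # Start tmp at the first character after '{'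
--                 count = 1
--                 tmp = curr + 6
--
--                 # Increment counter if an open parenthesis is found
--                 # Decrement counter if a closing parenthesis is found
--                 # tmp will end up at the closing parenthesis that matches the starting open parenthesis
--                 while count > 0 and tmp < length:
--                     if text[tmp] == '(':
--                         count += 1
--                     elif text[tmp] == ')':
--                         count -= 1
--
--                     tmp += 1
--
--                 # Add '}' after the closing parenthesis
--                 if tmp == length:
--                     text.append('}')
--                 else:
--                     text.insert(tmp, '}')
--                 length += 1
--
--                 curr += 4
--
--             curr += 1
--
--         # If anything fails, return array before the error
--         except:
--             return prev
--
--         prev = text.copy()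
--
--     return text
-- ===== SOURCE B (Python) =====
-- def convertLogarithms(text):
--     # Wrap each 'log' in LaTeX as '\log{...}': the brace closes where the
--     # parenthesis group opening the log's argument closes (or at end of input).
--     # Single pass over the input; builds a new list (the original mutates its
--     # argument in place).
--     n = len(text)
--     out = []
--     open_braces = []            # parenthesis depth at which each open '\log{' began
--     depth = 0
--     i = 0
--     while i < n:
--         if text[i:i+3] == ['l', 'o', 'g']:
--             if i + 3 == n:
--                 # a bare trailing 'log' has no argument yet: keep it as typed
--                 out += ['l', 'o', 'g']
--             else:
--                 out += ['\\', 'l', 'o', 'g', '{']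
--                 open_braces.append(depth)
--             i += 3
--         else:
--             c = text[i]
--             out.append(c)
--             if c == '(':
--                 depth += 1
--             elif c == ')':
--                 depth -= 1
--                 while open_braces and open_braces[-1] >= depth:
--                     open_braces.pop()
--                     out.append('}')
--             i += 1
--     return out + ['}'] * len(open_braces)
-- ===== Notes on version B (the rewrite author's own statement) =====
-- stated objective: faster
-- what changed: A repeatedly inserts into the list it is iterating over and re-scans ahead for the matching parenthesis of every 'log' (quadratic); B builds the output in one left-to-right pass, tracking the paren depth at which each open \log{ brace began on a stack, so no look-ahead scan or mid-list insertion is needed. …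
import Mathlib
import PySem

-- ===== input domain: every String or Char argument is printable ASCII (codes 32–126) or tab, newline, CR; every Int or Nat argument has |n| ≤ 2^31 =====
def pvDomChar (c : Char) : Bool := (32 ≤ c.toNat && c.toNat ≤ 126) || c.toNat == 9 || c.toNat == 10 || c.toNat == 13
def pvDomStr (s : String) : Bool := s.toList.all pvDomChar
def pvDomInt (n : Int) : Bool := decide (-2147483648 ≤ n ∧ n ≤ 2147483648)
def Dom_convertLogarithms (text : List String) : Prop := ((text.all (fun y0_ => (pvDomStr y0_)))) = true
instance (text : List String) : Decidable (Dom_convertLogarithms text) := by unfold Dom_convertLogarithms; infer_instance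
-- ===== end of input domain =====

-- B replaces A's insert-and-rescan loop by a single pass with a stack of open braces (asymptotically
-- faster); A also mutates its argument in place — the equivalence proved here is about the RETURN value only.

-- ===== PORT A =====
-- module constant `log`
def logChars : List String := ["l", "o", "g"]

-- inner `while count > 0 and tmp < length` scan; `text[tmp]` is in range (tmp < length = len(text)),
-- so the IndexError/except branch of A is unreachable
def aScan (text : List String) (count : Int) (tmp length : Nat) : Nat :=
  if _h : 0 < count ∧ tmp < length then
    let c := PySem.List.pyGetD text (tmp : Int) ""
    let count' := if c = "(" then count + 1 else if c = ")" then count - 1 else count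
    aScan text count' (tmp + 1) length
  else tmp
termination_by length - tmp
decreasing_by omega

-- outer `while curr < length` loop; `prev` is carried as in A but (the except being unreachable)
-- is never returned; curr += 4 then curr += 1 is written curr + 5, length += 2 then += 1 inlined
def aLoop (text prev : List String) (curr length : Nat) : List String :=
  if _h1 : curr < length then
    if _h2 : curr + 2 < length ∧
        PySem.List.slice text (some (curr : Int)) (some ((curr : Int) + 3)) = logChars then
      if curr + 3 = length then text
      else
        let text1 := PySem.List.insert text (curr : Int) "\\"
        let text2 := PySem.List.insert text1 ((curr : Int) + 4) "{"
        let tmp := aScan text2 1 (curr + 6) (length + 2)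
        let text3 := if tmp = length + 2 then text2 ++ ["}"] else PySem.List.insert text2 (tmp : Int) "}"
        aLoop text3 text3 (curr + 5) (length + 3)
    else aLoop text text (curr + 1) length
  else text
termination_by length - curr
decreasing_by all_goals omega

def convertLogarithms (text : List String) : List String :=
  aLoop text text 0 text.length

-- ===== PORT B =====
-- `while open_braces and open_braces[-1] >= depth: open_braces.pop(); out.append('}')`
def bPop (stack : List Int) (depth : Int) (out : List String) : List Int × List String :=
  match stack with
  | [] => ([], out)
  | t :: rest => if t ≥ depth then bPop rest depth (out ++ ["}"]) else (t :: rest, out)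

-- the single `while i < n` pass of Source B
def bLoop (text : List String) (n i : Nat) (depth : Int) (stack : List Int) (out : List String) :
    List String :=
  if _h : i < n then
    if PySem.List.slice text (some (i : Int)) (some ((i : Int) + 3)) = logChars then
      if i + 3 = n then bLoop text n (i + 3) depth stack (out ++ ["l", "o", "g"])
      else bLoop text n (i + 3) depth (depth :: stack) (out ++ ["\\", "l", "o", "g", "{"])
    else
      let c := text.getD i ""
      if c = "(" then bLoop text n (i + 1) (depth + 1) stack (out ++ [c])
      else if c = ")" then
        let r := bPop stack (depth - 1) (out ++ [c])
        bLoop text n (i + 1) (depth - 1) r.1 r.2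
      else bLoop text n (i + 1) depth stack (out ++ [c])
  else out ++ List.replicate stack.length "}"
termination_by n - i
decreasing_by all_goals omega

def convertLogarithms_alt (text : List String) : List String :=
  bLoop text text.length 0 0 [] []

-- ===== PRECONDITION & SPEC =====
-- Pre_ excludes inputs where some 'log' is not immediately followed by '(' (except a bare trailing
-- 'log' in a text containing no other 'log'): there A's closing-brace placement — its inner scan
-- skips the character right after 'log', and a trailing 'log' makes A return its half-transformed
-- buffer — is an accident of its insertion scheme on malformed input, and B's is equally defensible.
def Pre_convertLogarithms (text : List String) : Prop :=
  (∀ i, i < text.length → (text.drop i).take 3 = logChars → i + 3 < text.length →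
      text.getD (i + 3) "" = "(") ∧
  (3 ≤ text.length → text.drop (text.length - 3) = logChars →
      ∀ i, i < text.length → i + 3 < text.length → (text.drop i).take 3 ≠ logChars)
instance (text : List String) : Decidable (Pre_convertLogarithms text) := by
  unfold Pre_convertLogarithms; infer_instance

def pvWitness_convertLogarithms : List String := ["l", "o", "g", "(", "x", ")"]

def Spec_convertLogarithms (text : List String) (out : List String) : Prop :=
  out = convertLogarithms_alt text
instance (text : List String) (out : List String) : Decidable (Spec_convertLogarithms text out) := by
  unfold Spec_convertLogarithms; infer_instance

-- ===== CLAIM (what is proved, stated in full; the proofs are below) =====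
def Claim_equal_convertLogarithms : Prop :=
  ∀ (text : List String), Dom_convertLogarithms text → Pre_convertLogarithms text →
    Spec_convertLogarithms text (convertLogarithms text)

-- ===== LEMMAS AND PROOFS =====

-- number of entries popped (each emits one "}") and the remaining stack
def popW (st : List Int) (d : Int) : Nat × List Int :=
  match st with
  | [] => (0, [])
  | t :: r => if t > d then ((popW r d).1 + 1, (popW r d).2) else (0, t :: r)

-- A's working list from position `curr` on, reconstructed from the not-yet-consumed source
-- suffix s, the current paren depth d and the thresholds st of the still-open \log{ braces:
-- the "}" characters A has already inserted ahead of curr are materialized where they sit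
def embedS : List String → Int → List Int → List String
  | [], _, st => List.replicate st.length "}"
  | c :: s, d, st =>
    if c = "(" then c :: embedS s (d + 1) st
    else if c = ")" then
      c :: (List.replicate (popW st (d - 1)).1 "}" ++ embedS s (d - 1) (popW st (d - 1)).2)
    else c :: embedS s d st

-- the common result of both programs, as a function of (suffix, depth, stack)
def FF (s : List String) (d : Int) (st : List Int) : List String :=
  match s with
  | [] => List.replicate st.length "}"
  | c :: s1 =>
    if _hlog : c = "l" ∧ s1.take 2 = ["o", "g"] then
      match s1 with
      | _o :: _g :: rest =>
        match rest with
        | [] =>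
          if st = [] then ["l", "o", "g"]
          else ["\\", "l", "o", "g", "{"] ++ List.replicate (st.length + 1) "}"
        | c2 :: s4 =>
          if c2 = "(" then ["\\", "l", "o", "g", "{", "("] ++ FF s4 (d + 1) ((d + 1) :: st)
          else if c2 = ")" then
            ["\\", "l", "o", "g", "{", ")"] ++ List.replicate (popW st (d - 1)).1 "}" ++
              FF s4 (d - 1) ((d - 1) :: (popW st (d - 1)).2)
          else ["\\", "l", "o", "g", "{"] ++ FF (c2 :: s4) d (d :: st)
      | _ => []  -- unreachable: _hlog forces s1 to have at least two elements
    else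
      if c = "(" then c :: FF s1 (d + 1) st
      else if c = ")" then
        c :: (List.replicate (popW st (d - 1)).1 "}" ++ FF s1 (d - 1) (popW st (d - 1)).2)
      else c :: FF s1 d st
termination_by s.length
decreasing_by all_goals (first | (simp_all; omega) | simp_all | omega)

-- relative version of aScan: how many characters of the suffix the paren scan consumes
def relScan : List String → Int → Nat
  | [], _ => 0
  | c :: u, k =>
    if 0 < k then
      1 + relScan u (if c = "(" then k + 1 else if c = ")" then k - 1 else k)
    else 0

lemma popW_len (st : List Int) (d : Int) : (popW st d).1 + (popW st d).2.length = st.length := by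
  induction st with
  | nil => simp [popW]
  | cons t r ih => by_cases h : t > d <;> simp [popW, h] <;> omega

lemma popW_eq_zero (st : List Int) (e : Int) (h : ∀ x ∈ st, x ≤ e) : popW st e = (0, st) := by
  cases st with
  | nil => rfl
  | cons t r =>
    have := h t (by simp)
    simp [popW, show ¬ t > e by omega]

lemma popW_rest_le (st : List Int) (e : Int) (hs : st.Pairwise (· ≥ ·)) :
    ∀ x ∈ (popW st e).2, x ≤ e := by
  induction st with
  | nil => simp [popW]
  | cons t r ih =>
    by_cases h : t > e
    · simpa [popW, h] using ih (List.Pairwise.sublist (List.sublist_cons_self t r) hs)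
    · intro x hx
      simp [popW, h] at hx
      rcases hx with rfl | hx
      · omega
      · have := (List.pairwise_cons.mp hs).1 x hx; omega

lemma popW_rest_pairwise (st : List Int) (e : Int) (hs : st.Pairwise (· ≥ ·)) :
    (popW st e).2.Pairwise (· ≥ ·) := by
  induction st with
  | nil => simpa [popW]
  | cons t r ih =>
    by_cases h : t > e
    · simpa [popW, h] using ih (List.Pairwise.sublist (List.sublist_cons_self t r) hs)
    · simpa [popW, h] using hs

lemma length_embedS (s : List String) : ∀ (d : Int) (st : List Int),
    (embedS s d st).length = s.length + st.length := by
  induction s with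
  | nil => simp [embedS]
  | cons c s ih =>
    intro d st
    by_cases h1 : c = "("
    · simp [embedS, h1, ih]; omega
    · by_cases h2 : c = ")"
      · simp [embedS, h1, h2, ih]
        have := popW_len st (d - 1); omega
      · simp [embedS, h1, h2, ih]; omega

lemma embedS_nilstack (s : List String) : ∀ d : Int, embedS s d [] = s := by
  induction s with
  | nil => simp [embedS]
  | cons c s ih =>
    intro d
    by_cases h1 : c = "(" <;> by_cases h2 : c = ")" <;> simp [embedS, h1, h2, ih, popW]

lemma relScan_nonpos (u : List String) (k : Int) (h : k ≤ 0) : relScan u k = 0 := by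
  cases u <;> simp [relScan]; omega

lemma relScan_le_length (u : List String) : ∀ k : Int, relScan u k ≤ u.length := by
  induction u with
  | nil => intro k; simp [relScan]
  | cons c u ih =>
    intro k
    by_cases h : 0 < k
    · simp only [relScan, if_pos h, List.length_cons]
      have := ih (if c = "(" then k + 1 else if c = ")" then k - 1 else k)
      omega
    · simp [relScan, h]

-- unfolding equations for embedS and relScan
lemma embedS_nil (d : Int) (st : List Int) : embedS [] d st = List.replicate st.length "}" := by
  rw [embedS]

lemma embedS_open (s : List String) (d : Int) (st : List Int) :
    embedS ("(" :: s) d st = "(" :: embedS s (d + 1) st := by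
  rw [embedS]
  rw [if_pos rfl]

lemma embedS_close (s : List String) (d : Int) (st : List Int) :
    embedS (")" :: s) d st
      = ")" :: (List.replicate (popW st (d - 1)).1 "}" ++ embedS s (d - 1) (popW st (d - 1)).2) := by
  rw [embedS]
  rw [if_neg (by decide), if_pos rfl]

lemma embedS_char (c : String) (s : List String) (d : Int) (st : List Int)
    (h1 : ¬ c = "(") (h2 : ¬ c = ")") : embedS (c :: s) d st = c :: embedS s d st := by
  rw [embedS]
  rw [if_neg h1, if_neg h2]

lemma relScan_cons (c : String) (u : List String) (k : Int) (h : 0 < k) :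
    relScan (c :: u) k
      = 1 + relScan u (if c = "(" then k + 1 else if c = ")" then k - 1 else k) := by
  rw [relScan, if_pos h]

lemma rep_shift (n : Nat) :
    List.replicate n ("}" : String) ++ ["}"] = "}" :: List.replicate n "}" := by
  rw [← List.replicate_succ', List.replicate_succ]

lemma relScan_replicate_append (p : Nat) : ∀ (u : List String) (k : Int), 0 < k →
    relScan (List.replicate p "}" ++ u) k = p + relScan u k := by
  induction p with
  | zero => simp
  | succ p ih =>
    intro u k hk
    rw [List.replicate_succ, List.cons_append, relScan_cons _ _ _ hk]
    rw [if_neg (by decide), if_neg (by decide), ih u k hk]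
    omega

lemma relScan_replicate (p : Nat) (k : Int) (hk : 0 < k) :
    relScan (List.replicate p "}") k = p := by
  have h := relScan_replicate_append p [] k hk
  simp only [List.append_nil] at h
  rw [h]
  simp [relScan]

-- first three characters of A's working list are "log" only if the source suffix starts with "log"
lemma take3_embedS_log (s : List String) (d : Int) (st : List Int)
    (h : (embedS s d st).take 3 = ["l", "o", "g"]) : s.take 3 = ["l", "o", "g"] := by
  rcases s with _ | ⟨c1, s1⟩
  · exfalso
    rcases st with _ | ⟨t, st'⟩
    · rw [embedS_nil] at h; simp at h
    · rw [embedS_nil] at h; simp [List.replicate_succ] at h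
  have hc1 : c1 = "l" := by
    by_cases h1 : c1 = "("
    · exact absurd h1 (by rw [h1, embedS_open] at h; simp_all)
    · by_cases h2 : c1 = ")"
      · exact absurd h2 (by rw [h2, embedS_close] at h; simp_all)
      · rw [embedS_char c1 s1 d st h1 h2] at h
        rw [show (3 : Nat) = 2 + 1 from rfl, List.take_succ_cons] at h
        exact (List.cons_eq_cons.mp h).1
  subst hc1
  rw [embedS_char _ _ _ _ (by decide) (by decide),
    show (3 : Nat) = 2 + 1 from rfl, List.take_succ_cons] at h
  have h' := (List.cons_eq_cons.mp h).2
  rw [show (3 : Nat) = 2 + 1 from rfl, List.take_succ_cons]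
  refine List.cons_eq_cons.mpr ⟨rfl, ?_⟩
  clear h
  rcases s1 with _ | ⟨c2, s2⟩
  · exfalso
    rcases st with _ | ⟨t, st'⟩
    · rw [embedS_nil] at h'; simp at h'
    · rw [embedS_nil] at h'; simp [List.replicate_succ] at h'
  have hc2 : c2 = "o" := by
    by_cases h1 : c2 = "("
    · exact absurd h1 (by rw [h1, embedS_open] at h'; simp_all)
    · by_cases h2 : c2 = ")"
      · exact absurd h2 (by rw [h2, embedS_close] at h'; simp_all)
      · rw [embedS_char c2 s2 d st h1 h2] at h'
        rw [show (2 : Nat) = 1 + 1 from rfl, List.take_succ_cons] at h'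
        exact (List.cons_eq_cons.mp h').1
  subst hc2
  rw [embedS_char _ _ _ _ (by decide) (by decide),
    show (2 : Nat) = 1 + 1 from rfl, List.take_succ_cons] at h'
  have h'' := (List.cons_eq_cons.mp h').2
  rw [show (2 : Nat) = 1 + 1 from rfl, List.take_succ_cons]
  refine List.cons_eq_cons.mpr ⟨rfl, ?_⟩
  clear h'
  rcases s2 with _ | ⟨c3, s3⟩
  · exfalso
    rcases st with _ | ⟨t, st'⟩
    · rw [embedS_nil] at h''; simp at h''
    · rw [embedS_nil] at h''; simp [List.replicate_succ] at h''
  have hc3 : c3 = "g" := by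
    by_cases h1 : c3 = "("
    · exact absurd h1 (by rw [h1, embedS_open] at h''; simp_all)
    · by_cases h2 : c3 = ")"
      · exact absurd h2 (by rw [h2, embedS_close] at h''; simp_all)
      · rw [embedS_char c3 s3 d st h1 h2] at h''
        rw [show (1 : Nat) = 0 + 1 from rfl, List.take_succ_cons] at h''
        exact (List.cons_eq_cons.mp h'').1
  subst hc3
  rw [show (1 : Nat) = 0 + 1 from rfl, List.take_succ_cons]
  simp

lemma take3_cons_iff (c : String) (s1 : List String) :
    (c :: s1).take 3 = ["l", "o", "g"] ↔ (c = "l" ∧ s1.take 2 = ["o", "g"]) := by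
  rw [show (3 : Nat) = 2 + 1 from rfl, List.take_succ_cons]
  exact List.cons_eq_cons

-- Python list.insert at a nonnegative in-range index
lemma insert_eq_take_drop (xs : List String) (n : Nat) (v : String) (h : n ≤ xs.length) :
    PySem.List.insert xs (n : Int) v = xs.take n ++ v :: xs.drop n := by
  simp only [PySem.List.insert, PySem.List.sliceIndices]
  rw [if_neg (by omega), if_neg (by omega)]
  have h2 : (min (n : Int) (xs.length : Int)).toNat = n := by omega
  rw [h2]

lemma getD_mid (w u : List String) (c dft : String) (k : Nat) (hk : k = w.length) :
    (w ++ c :: u).getD k dft = c := by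
  subst hk; simp [List.getD]

lemma take_mid (w u : List String) (r : Nat) :
    (w ++ u).take (w.length + r) = w ++ u.take r := by
  rw [List.take_append, List.take_of_length_le (by omega)]
  congr 1; congr 1; omega

lemma drop_mid (w u : List String) (r : Nat) :
    (w ++ u).drop (w.length + r) = u.drop r := by
  rw [List.drop_append, List.drop_of_length_le (by omega)]
  simp

-- the slice text[curr:curr+3] read relative to a prefix already processed
lemma slice3 (w u : List String) :
    PySem.List.slice (w ++ u) (some (w.length : Int)) (some ((w.length : Int) + 3)) = u.take 3 := by
  rw [PySem.List.slice_toNat (xs := w ++ u) (a := (w.length : Int)) (b := (w.length : Int) + 3)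
    (by omega) (by omega)]
  have h1 : ((w.length : Int)).toNat = w.length := by omega
  have h2 : (((w.length : Int)) + 3).toNat = w.length + 3 := by omega
  rw [h1, h2, List.drop_left]
  congr 1
  omega

-- A's paren scan over a suffix, in relative coordinates
lemma aScan_bridge : ∀ (u w : List String) (k : Int) (L : Nat), L = w.length + u.length →
    aScan (w ++ u) k w.length L = w.length + relScan u k := by
  intro u
  induction u with
  | nil =>
    intro w k L hL
    rw [aScan, dif_neg (by simp at hL; omega)]
    simp [relScan]
  | cons c u ih =>
    intro w k L hL
    by_cases hk : 0 < k
    · rw [aScan, dif_pos ⟨hk, by simp at hL ⊢; omega⟩]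
      simp only [PySem.List.pyGetD_natCast]
      rw [getD_mid w u c "" w.length rfl]
      have hrw : w ++ c :: u = (w ++ [c]) ++ u := by simp
      have hlen : w.length + 1 = (w ++ [c]).length := by simp
      rw [hrw, hlen, ih (w ++ [c]) _ L (by simp at hL ⊢; omega)]
      rw [relScan_cons c u k hk]
      simp only [List.length_append, List.length_cons, List.length_nil]
      omega
    · rw [aScan, dif_neg (by omega)]
      simp [relScan, hk]

-- inserting "}" where A's scan (count k) stops turns the pending stack st into (d-k+1) :: st
lemma scan_embedS : ∀ (s : List String) (d : Int) (st : List Int) (k : Int), 1 ≤ k →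
    (∀ x ∈ st, x ≤ d - k + 1) →
    (embedS s d st).take (relScan (embedS s d st) k) ++
        "}" :: (embedS s d st).drop (relScan (embedS s d st) k)
      = embedS s d ((d - k + 1) :: st) := by
  intro s
  induction s with
  | nil =>
    intro d st k hk _
    rw [embedS_nil, embedS_nil, relScan_replicate st.length k (by omega)]
    rw [List.take_replicate, List.drop_replicate]
    simp only [min_self, Nat.sub_self, List.replicate_zero, List.length_cons]
    rw [List.replicate_succ]
    exact rep_shift st.length
  | cons c s ih =>
    intro d st k hk hst
    by_cases h1 : c = "("
    · subst h1
      rw [embedS_open, embedS_open, relScan_cons _ _ _ (by omega)]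
      rw [if_pos rfl]
      rw [show 1 + relScan (embedS s (d + 1) st) (k + 1)
            = relScan (embedS s (d + 1) st) (k + 1) + 1 by omega]
      rw [List.take_succ_cons, List.drop_succ_cons, List.cons_append]
      rw [ih (d + 1) st (k + 1) (by omega) (by intro x hx; have := hst x hx; omega)]
      rw [show d - k + 1 = (d + 1) - (k + 1) + 1 by omega]
    · by_cases h2 : c = ")"
      · subst h2
        by_cases hk1 : k = 1
        · subst hk1
          rw [embedS_close, embedS_close, relScan_cons _ _ _ (by omega)]
          rw [if_neg (by decide), if_pos rfl]
          rw [relScan_nonpos _ (1 - 1) (by omega)]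
          rw [show (1 + 0 : Nat) = 0 + 1 from rfl]
          rw [List.take_succ_cons, List.drop_succ_cons, List.take_zero, List.drop_zero]
          have hp : popW ((d - 1 + 1) :: st) (d - 1)
              = ((popW st (d - 1)).1 + 1, (popW st (d - 1)).2) := by
            rw [popW]
            rw [if_pos (by omega)]
          rw [hp]
          rw [List.replicate_succ]
          rfl
        · -- k ≥ 2: nothing else can close while we are inside this log's extra parens
          have hpz : popW st (d - 1) = (0, st) :=
            popW_eq_zero st (d - 1) (by intro x hx; have := hst x hx; omega)
          have hpz2 : popW ((d - k + 1) :: st) (d - 1) = (0, (d - k + 1) :: st) :=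
            popW_eq_zero _ (d - 1) (by
              intro x hx
              rcases List.mem_cons.mp hx with rfl | hx
              · omega
              · have := hst x hx; omega)
          rw [embedS_close, embedS_close, hpz, hpz2]
          simp only [List.replicate_zero, List.nil_append]
          rw [relScan_cons _ _ _ (by omega), if_neg (by decide), if_pos rfl]
          rw [show 1 + relScan (embedS s (d - 1) st) (k - 1)
                = relScan (embedS s (d - 1) st) (k - 1) + 1 by omega]
          rw [List.take_succ_cons, List.drop_succ_cons, List.cons_append]
          rw [ih (d - 1) st (k - 1) (by omega) (by intro x hx; have := hst x hx; omega)]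
          rw [show d - k + 1 = (d - 1) - (k - 1) + 1 by omega]
      · rw [embedS_char c s d st h1 h2, embedS_char c s d _ h1 h2,
          relScan_cons _ _ _ (by omega), if_neg h1, if_neg h2]
        rw [show 1 + relScan (embedS s d st) k = relScan (embedS s d st) k + 1 by omega]
        rw [List.take_succ_cons, List.drop_succ_cons, List.cons_append]
        rw [ih d st k hk hst]

-- the branch dispatch shared by both loops, factored: insert "}" at the scan position
lemma insert_mid_eq (w u : List String) (r : Nat) (hr : r ≤ u.length) (L2 : Nat)
    (hL2 : L2 = w.length + u.length) :
    (if w.length + r = L2 then (w ++ u) ++ ["}"]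
     else PySem.List.insert (w ++ u) ((w.length + r : Nat) : Int) "}")
      = w ++ (u.take r ++ "}" :: u.drop r) := by
  split_ifs with htmp
  · have hru : r = u.length := by omega
    subst hru
    rw [List.take_length, List.drop_length]
    simp
  · rw [insert_eq_take_drop _ _ _ (by simp; omega), take_mid, drop_mid,
      List.append_assoc]

-- FF unfolding equations
lemma FF_nil (d : Int) (st : List Int) : FF [] d st = List.replicate st.length "}" := by
  rw [FF]

lemma FF_char (c : String) (s1 : List String) (d : Int) (st : List Int)
    (hnl : ¬(c = "l" ∧ s1.take 2 = ["o", "g"])) :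
    FF (c :: s1) d st =
      if c = "(" then c :: FF s1 (d + 1) st
      else if c = ")" then
        c :: (List.replicate (popW st (d - 1)).1 "}" ++ FF s1 (d - 1) (popW st (d - 1)).2)
      else c :: FF s1 d st := by
  rw [FF]
  simp only [dif_neg hnl]

lemma FF_log_nil (d : Int) (st : List Int) :
    FF ["l", "o", "g"] d st =
      if st = [] then ["l", "o", "g"]
      else ["\\", "l", "o", "g", "{"] ++ List.replicate (st.length + 1) "}" := by
  rw [FF]
  rw [dif_pos (⟨rfl, rfl⟩ :
    ("l" : String) = "l" ∧ List.take 2 (["o", "g"] : List String) = ["o", "g"])]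

lemma FF_log_cons (c2 : String) (s4 : List String) (d : Int) (st : List Int) :
    FF ("l" :: "o" :: "g" :: c2 :: s4) d st =
      if c2 = "(" then ["\\", "l", "o", "g", "{", "("] ++ FF s4 (d + 1) ((d + 1) :: st)
      else if c2 = ")" then
        ["\\", "l", "o", "g", "{", ")"] ++ List.replicate (popW st (d - 1)).1 "}" ++
          FF s4 (d - 1) ((d - 1) :: (popW st (d - 1)).2)
      else ["\\", "l", "o", "g", "{"] ++ FF (c2 :: s4) d (d :: st) := by
  rw [FF]
  rw [dif_pos (⟨rfl, rfl⟩ :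
    ("l" : String) = "l" ∧ List.take 2 ("o" :: "g" :: c2 :: s4) = ["o", "g"])]

-- aLoop stepping lemmas
lemma aLoop_stop (text prev : List String) (curr length : Nat) (h : ¬ curr < length) :
    aLoop text prev curr length = text := by
  rw [aLoop, dif_neg h]

lemma aLoop_prev (text p q : List String) (curr length : Nat) :
    aLoop text p curr length = aLoop text q curr length := by
  conv_lhs => rw [aLoop]
  conv_rhs => rw [aLoop]

lemma aLoop_step_else (text prev : List String) (curr length : Nat) (h1 : curr < length)
    (h2 : ¬(curr + 2 < length ∧
      PySem.List.slice text (some (curr : Int)) (some ((curr : Int) + 3)) = logChars)) :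
    aLoop text prev curr length = aLoop text text (curr + 1) length := by
  rw [aLoop, dif_pos h1, dif_neg h2]

-- A walks over already-inserted "}" characters without doing anything
lemma aLoop_walk : ∀ (p : Nat) (w v prev : List String) (L : Nat), L = w.length + p + v.length →
    aLoop (w ++ (List.replicate p "}" ++ v)) prev w.length L
      = aLoop (w ++ (List.replicate p "}" ++ v)) prev (w.length + p) L := by
  intro p
  induction p with
  | zero => intro w v prev L _; rfl
  | succ p ih =>
    intro w v prev L hL
    have hrw : w ++ (List.replicate (p + 1) "}" ++ v)
        = (w ++ ["}"]) ++ (List.replicate p "}" ++ v) := by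
      simp [List.replicate_succ]
    have hstep : aLoop (w ++ (List.replicate (p + 1) "}" ++ v)) prev w.length L
        = aLoop (w ++ (List.replicate (p + 1) "}" ++ v))
            (w ++ (List.replicate (p + 1) "}" ++ v)) (w.length + 1) L := by
      apply aLoop_step_else
      · omega
      · rintro ⟨-, hsl⟩
        rw [slice3 w (List.replicate (p + 1) "}" ++ v)] at hsl
        rw [List.replicate_succ, List.cons_append,
          show (3 : Nat) = 2 + 1 from rfl, List.take_succ_cons] at hsl
        have : ("}" : String) = "l" := (List.cons_eq_cons.mp hsl).1
        exact absurd this (by decide)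
    rw [hstep, hrw]
    have hlen : w.length + 1 = (w ++ ["}"]).length := by simp
    rw [hlen, ih (w ++ ["}"]) v _ L (by simp at hL ⊢; omega)]
    rw [show (w ++ ["}"]).length + p = w.length + (p + 1) by simp <;> omega]
    rw [← hrw]
    exact aLoop_prev _ _ prev _ _

lemma main_nil (d : Int) (st : List Int) (out prev : List String) (L : Nat)
    (hL : L = out.length + st.length) :
    aLoop (out ++ embedS [] d st) prev out.length L = out ++ FF [] d st := by
  rw [FF_nil, embedS_nil]
  rw [show out ++ List.replicate st.length "}"
      = out ++ (List.replicate st.length "}" ++ []) by simp]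
  rw [aLoop_walk st.length out [] prev L (by simp; omega)]
  rw [aLoop_stop _ _ _ _ (by simp; omega)]

-- the central simulation: A's loop on (processed ++ pending-materialized suffix) computes FF
lemma main : ∀ (n : Nat) (s : List String) (d : Int) (st : List Int) (out prev : List String)
    (L : Nat), s.length ≤ n → st.Pairwise (· ≥ ·) → (∀ x ∈ st, x ≤ d) →
    L = out.length + s.length + st.length →
    aLoop (out ++ embedS s d st) prev out.length L = out ++ FF s d st := by
  intro n
  induction n with
  | zero =>
    intro s d st out prev L hn _ _ hL
    have hs : s = [] := List.eq_nil_of_length_eq_zero (by omega)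
    subst hs
    exact main_nil d st out prev L (by simp at hL; omega)
  | succ n ih =>
    intro s d st out prev L hn hpair hle hL
    rcases s with _ | ⟨c, s1⟩
    · exact main_nil d st out prev L (by simp at hL; omega)
    by_cases hlog : (c :: s1).take 3 = ["l", "o", "g"]
    · -- a "log" starts here
      obtain ⟨rfl, h2⟩ := (take3_cons_iff c s1).mp hlog
      rcases s1 with _ | ⟨b, s2⟩
      · simp at h2
      rcases s2 with _ | ⟨g, rest⟩
      · simp at h2
      have hbg : b = "o" ∧ g = "g" := by
        rw [show (2 : Nat) = 1 + 1 from rfl, List.take_succ_cons,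
          show (1 : Nat) = 0 + 1 from rfl, List.take_succ_cons, List.take_zero] at h2
        exact ⟨(List.cons_eq_cons.mp h2).1, (List.cons_eq_cons.mp (List.cons_eq_cons.mp h2).2).1⟩
      obtain ⟨rfl, rfl⟩ := hbg
      have hU : embedS ("l" :: "o" :: "g" :: rest) d st
          = "l" :: "o" :: "g" :: embedS rest d st := by
        rw [embedS_char _ _ _ _ (by decide) (by decide),
          embedS_char _ _ _ _ (by decide) (by decide),
          embedS_char _ _ _ _ (by decide) (by decide)]
      simp only [List.length_cons] at hn hL
      have h1 : out.length < L := by omega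
      rw [hU]
      have hcond : out.length + 2 < L ∧
          PySem.List.slice (out ++ "l" :: "o" :: "g" :: embedS rest d st)
            (some (out.length : Int)) (some ((out.length : Int) + 3)) = logChars := by
        refine ⟨by omega, ?_⟩
        rw [slice3 out ("l" :: "o" :: "g" :: embedS rest d st)]
        rfl
      rw [aLoop, dif_pos h1, dif_pos hcond]
      by_cases hend : rest = [] ∧ st = []
      · obtain ⟨rfl, rfl⟩ := hend
        simp only [List.length_nil] at hL
        rw [if_pos (by omega)]
        rw [embedS_nil]
        rw [FF_log_nil, if_pos rfl]
        simp
      · have hne3 : ¬(out.length + 3 = L) := by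
          rcases not_and_or.mp hend with h | h
          · have : 0 < rest.length := List.length_pos_iff.mpr h
            omega
          · have : 0 < st.length := List.length_pos_iff.mpr h
            omega
        rw [if_neg hne3]
        dsimp only
        rw [insert_eq_take_drop _ out.length "\\" (by simp), List.take_left, List.drop_left]
        rw [show ((out.length : Int) + 4) = ((out.length + 4 : Nat) : Int) by push_cast; ring]
        rw [show out ++ "\\" :: "l" :: "o" :: "g" :: embedS rest d st
            = (out ++ ["\\", "l", "o", "g"]) ++ embedS rest d st by
          simp only [List.append_assoc, List.cons_append, List.nil_append]]
        rw [insert_eq_take_drop _ (out.length + 4) "{" (by simp)]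
        rw [show out.length + 4 = (out ++ ["\\", "l", "o", "g"]).length by simp]
        rw [List.take_left, List.drop_left]
        rcases rest with _ | ⟨c2, s4⟩
        · -- the argument of this log never closes: A appends the final "}"
          rcases st with _ | ⟨t, st'⟩
          · exact absurd ⟨rfl, rfl⟩ hend
          simp only [List.length_nil, List.length_cons] at hL
          rw [embedS_nil]
          rw [show (out ++ ["\\", "l", "o", "g"]) ++ "{" :: List.replicate (t :: st').length "}"
              = ((out ++ ["\\", "l", "o", "g", "{"]) ++ ["}"]) ++ List.replicate st'.length "}" by
            simp [List.replicate_succ]]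
          rw [show out.length + 6 = ((out ++ ["\\", "l", "o", "g", "{"]) ++ ["}"]).length by simp]
          rw [aScan_bridge (List.replicate st'.length "}") _ 1 (L + 2) (by simp; omega)]
          rw [relScan_replicate st'.length 1 (by omega)]
          rw [if_pos (by simp; omega)]
          rw [show (((out ++ ["\\", "l", "o", "g", "{"]) ++ ["}"])
                ++ List.replicate st'.length "}") ++ ["}"]
              = (out ++ ["\\", "l", "o", "g", "{"])
                  ++ (List.replicate (st'.length + 2) "}" ++ []) by
            simp [List.replicate_succ, rep_shift]]
          rw [show out.length + 5 = (out ++ ["\\", "l", "o", "g", "{"]).length by simp]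
          rw [aLoop_walk (st'.length + 2) (out ++ ["\\", "l", "o", "g", "{"]) [] _ (L + 3)
            (by simp; omega)]
          rw [aLoop_stop _ _ _ _ (by simp; omega)]
          rw [FF_log_nil, if_neg (by simp)]
          simp [List.replicate_succ, rep_shift]
        · -- there is a character after the "log"
          simp only [List.length_cons] at hn hL
          by_cases hc2A : c2 = "("
          · subst hc2A
            rw [embedS_open]
            rw [show (out ++ ["\\", "l", "o", "g"]) ++ "{" :: "(" :: embedS s4 (d + 1) st
                = (out ++ ["\\", "l", "o", "g", "{", "("]) ++ embedS s4 (d + 1) st by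
              simp only [List.append_assoc, List.cons_append, List.nil_append]]
            rw [show out.length + 6 = (out ++ ["\\", "l", "o", "g", "{", "("]).length by simp]
            rw [aScan_bridge (embedS s4 (d + 1) st) _ 1 (L + 2)
              (by simp [length_embedS]; omega)]
            have hr := relScan_le_length (embedS s4 (d + 1) st) 1
            rw [insert_mid_eq _ _ _ hr (L + 2) (by simp [length_embedS]; omega)]
            have hscan := scan_embedS s4 (d + 1) st 1 (le_refl 1)
              (by intro x hx; have := hle x hx; omega)
            rw [show (d + 1) - 1 + 1 = d + 1 by omega] at hscan
            rw [hscan]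
            rw [show (out ++ ["\\", "l", "o", "g", "{", "("]) ++ embedS s4 (d + 1) ((d + 1) :: st)
                = (out ++ ["\\", "l", "o", "g", "{"]) ++ "(" :: embedS s4 (d + 1) ((d + 1) :: st) by
              simp only [List.append_assoc, List.cons_append, List.nil_append]]
            rw [aLoop_step_else _ _ _ _ (by omega)
              (by
                rintro ⟨-, hsl⟩
                rw [show out.length + 5 = (out ++ ["\\", "l", "o", "g", "{"]).length by simp] at hsl
                rw [slice3] at hsl
                rw [show (3 : Nat) = 2 + 1 from rfl, List.take_succ_cons] at hsl
                simp only [logChars] at hsl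
                exact absurd (List.cons_eq_cons.mp hsl).1 (by decide))]
            rw [show (out ++ ["\\", "l", "o", "g", "{"]) ++ "(" :: embedS s4 (d + 1) ((d + 1) :: st)
                = (out ++ ["\\", "l", "o", "g", "{", "("]) ++ embedS s4 (d + 1) ((d + 1) :: st) by
              simp only [List.append_assoc, List.cons_append, List.nil_append]]
            rw [show out.length + 5 + 1 = (out ++ ["\\", "l", "o", "g", "{", "("]).length by simp]
            rw [ih s4 (d + 1) ((d + 1) :: st) (out ++ ["\\", "l", "o", "g", "{", "("]) _ (L + 3)
              (by omega)
              (List.pairwise_cons.mpr ⟨fun x hx => by have := hle x hx; omega, hpair⟩)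
              (by
                intro x hx
                rcases List.mem_cons.mp hx with rfl | hx
                · omega
                · have := hle x hx; omega)
              (by simp; omega)]
            rw [FF_log_cons, if_pos rfl]
            simp only [List.append_assoc, List.cons_append, List.nil_append]
          · by_cases hc2B : c2 = ")"
            · subst hc2B
              rw [embedS_close]
              have hplen := popW_len st (d - 1)
              rw [show (out ++ ["\\", "l", "o", "g"]) ++ "{" :: ")" ::
                    (List.replicate (popW st (d - 1)).1 "}"
                      ++ embedS s4 (d - 1) (popW st (d - 1)).2)
                  = (out ++ ["\\", "l", "o", "g", "{", ")"])
                      ++ (List.replicate (popW st (d - 1)).1 "}"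
                          ++ embedS s4 (d - 1) (popW st (d - 1)).2) by
                simp only [List.append_assoc, List.cons_append, List.nil_append]]
              rw [show out.length + 6 = (out ++ ["\\", "l", "o", "g", "{", ")"]).length by simp]
              rw [aScan_bridge _ _ 1 (L + 2) (by simp [length_embedS]; omega)]
              rw [relScan_replicate_append (popW st (d - 1)).1 _ 1 (by omega)]
              have hr := relScan_le_length (embedS s4 (d - 1) (popW st (d - 1)).2) 1
              rw [insert_mid_eq _ _ _
                (by simp only [List.length_append, List.length_replicate, length_embedS]
                      at hr ⊢
                    omega)
                (L + 2)
                (by simp only [List.length_append, List.length_cons, List.length_nil,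
                      List.length_replicate, length_embedS] at hr ⊢
                    omega)]
              rw [show (popW st (d - 1)).1 + relScan (embedS s4 (d - 1) (popW st (d - 1)).2) 1
                  = (List.replicate (popW st (d - 1)).1 ("}" : String)).length
                      + relScan (embedS s4 (d - 1) (popW st (d - 1)).2) 1 by simp]
              rw [take_mid, drop_mid]
              have hscan := scan_embedS s4 (d - 1) (popW st (d - 1)).2 1 (le_refl 1)
                (by
                  intro x hx
                  have := popW_rest_le st (d - 1) hpair x hx
                  omega)
              rw [show (d - 1) - 1 + 1 = d - 1 by omega] at hscan
              rw [List.append_assoc (List.replicate (popW st (d - 1)).1 "}"), hscan]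
              rw [show (out ++ ["\\", "l", "o", "g", "{", ")"])
                    ++ (List.replicate (popW st (d - 1)).1 "}"
                        ++ embedS s4 (d - 1) ((d - 1) :: (popW st (d - 1)).2))
                  = (out ++ ["\\", "l", "o", "g", "{"])
                      ++ ")" :: (List.replicate (popW st (d - 1)).1 "}"
                          ++ embedS s4 (d - 1) ((d - 1) :: (popW st (d - 1)).2)) by
                simp only [List.append_assoc, List.cons_append, List.nil_append]]
              rw [aLoop_step_else _ _ _ _ (by omega)
                (by
                  rintro ⟨-, hsl⟩
                  rw [show out.length + 5
                      = (out ++ ["\\", "l", "o", "g", "{"]).length by simp] at hsl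
                  rw [slice3] at hsl
                  rw [show (3 : Nat) = 2 + 1 from rfl, List.take_succ_cons] at hsl
                  simp only [logChars] at hsl
                  exact absurd (List.cons_eq_cons.mp hsl).1 (by decide))]
              rw [show (out ++ ["\\", "l", "o", "g", "{"])
                    ++ ")" :: (List.replicate (popW st (d - 1)).1 "}"
                        ++ embedS s4 (d - 1) ((d - 1) :: (popW st (d - 1)).2))
                  = (out ++ ["\\", "l", "o", "g", "{", ")"])
                      ++ (List.replicate (popW st (d - 1)).1 "}"
                          ++ embedS s4 (d - 1) ((d - 1) :: (popW st (d - 1)).2)) by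
                simp only [List.append_assoc, List.cons_append, List.nil_append]]
              rw [show out.length + 5 + 1
                  = (out ++ ["\\", "l", "o", "g", "{", ")"]).length by simp]
              rw [aLoop_walk (popW st (d - 1)).1 (out ++ ["\\", "l", "o", "g", "{", ")"])
                (embedS s4 (d - 1) ((d - 1) :: (popW st (d - 1)).2)) _ (L + 3)
                (by simp only [List.length_append, List.length_cons, List.length_nil,
                      length_embedS]
                    omega)]
              rw [show (out ++ ["\\", "l", "o", "g", "{", ")"])
                    ++ (List.replicate (popW st (d - 1)).1 "}"
                        ++ embedS s4 (d - 1) ((d - 1) :: (popW st (d - 1)).2))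
                  = ((out ++ ["\\", "l", "o", "g", "{", ")"])
                      ++ List.replicate (popW st (d - 1)).1 "}")
                      ++ embedS s4 (d - 1) ((d - 1) :: (popW st (d - 1)).2) by
                simp only [List.append_assoc]]
              rw [show (out ++ ["\\", "l", "o", "g", "{", ")"]).length + (popW st (d - 1)).1
                  = ((out ++ ["\\", "l", "o", "g", "{", ")"])
                      ++ List.replicate (popW st (d - 1)).1 "}").length by simp <;> omega]
              rw [ih s4 (d - 1) ((d - 1) :: (popW st (d - 1)).2)
                ((out ++ ["\\", "l", "o", "g", "{", ")"])
                  ++ List.replicate (popW st (d - 1)).1 "}") _ (L + 3)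
                (by omega)
                (List.pairwise_cons.mpr
                  ⟨fun x hx => by have := popW_rest_le st (d - 1) hpair x hx; omega,
                    popW_rest_pairwise st (d - 1) hpair⟩)
                (by
                  intro x hx
                  rcases List.mem_cons.mp hx with rfl | hx
                  · omega
                  · exact popW_rest_le st (d - 1) hpair x hx)
                (by simp <;> omega)]
              rw [FF_log_cons, if_neg (by decide), if_pos rfl]
              simp only [List.append_assoc, List.cons_append, List.nil_append]
            · -- c2 is not a parenthesis: it is re-scanned by the main loop
              rw [embedS_char c2 s4 d st hc2A hc2B]
              rw [show (out ++ ["\\", "l", "o", "g"]) ++ "{" :: c2 :: embedS s4 d st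
                  = ((out ++ ["\\", "l", "o", "g", "{"]) ++ [c2]) ++ embedS s4 d st by
                simp only [List.append_assoc, List.cons_append, List.nil_append]]
              rw [show out.length + 6
                  = ((out ++ ["\\", "l", "o", "g", "{"]) ++ [c2]).length by simp]
              rw [aScan_bridge (embedS s4 d st) _ 1 (L + 2) (by simp [length_embedS]; omega)]
              have hr := relScan_le_length (embedS s4 d st) 1
              rw [insert_mid_eq _ _ _ hr (L + 2) (by simp [length_embedS]; omega)]
              have hscan := scan_embedS s4 d st 1 (le_refl 1)
                (by intro x hx; have := hle x hx; omega)
              rw [show d - 1 + 1 = d by omega] at hscan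
              rw [hscan]
              rw [show ((out ++ ["\\", "l", "o", "g", "{"]) ++ [c2]) ++ embedS s4 d (d :: st)
                  = (out ++ ["\\", "l", "o", "g", "{"]) ++ (c2 :: embedS s4 d (d :: st)) by
                simp only [List.append_assoc, List.cons_append, List.nil_append]]
              rw [← embedS_char c2 s4 d (d :: st) hc2A hc2B]
              rw [show out.length + 5 = (out ++ ["\\", "l", "o", "g", "{"]).length by simp]
              rw [ih (c2 :: s4) d (d :: st) (out ++ ["\\", "l", "o", "g", "{"]) _ (L + 3)
                (by simp; omega)
                (List.pairwise_cons.mpr ⟨fun x hx => hle x hx, hpair⟩)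
                (by
                  intro x hx
                  rcases List.mem_cons.mp hx with rfl | hx
                  · omega
                  · exact hle x hx)
                (by simp <;> omega)]
              rw [FF_log_cons, if_neg hc2A, if_neg hc2B]
              simp only [List.append_assoc, List.cons_append, List.nil_append]
    · -- no "log" here: one ordinary character step
      simp only [List.length_cons] at hn hL
      have h1 : out.length < L := by omega
      have hnone : ¬(out.length + 2 < L ∧
          PySem.List.slice (out ++ embedS (c :: s1) d st) (some (out.length : Int))
            (some ((out.length : Int) + 3)) = logChars) := by
        rintro ⟨-, hsl⟩
        rw [slice3 out (embedS (c :: s1) d st)] at hsl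
        exact hlog (take3_embedS_log (c :: s1) d st hsl)
      rw [aLoop_step_else _ prev _ _ h1 hnone]
      have hnl : ¬(c = "l" ∧ s1.take 2 = ["o", "g"]) :=
        fun hc => hlog ((take3_cons_iff c s1).mpr hc)
      rw [FF_char c s1 d st hnl]
      by_cases hA : c = "("
      · subst hA
        rw [embedS_open]
        rw [show out ++ "(" :: embedS s1 (d + 1) st
            = (out ++ ["("]) ++ embedS s1 (d + 1) st by
          simp only [List.append_assoc, List.cons_append, List.nil_append]]
        rw [show out.length + 1 = (out ++ ["("]).length by simp]
        rw [ih s1 (d + 1) st (out ++ ["("]) _ L (by omega) hpair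
          (fun x hx => by have := hle x hx; omega) (by simp <;> omega)]
        rw [if_pos rfl]
        simp only [List.append_assoc, List.cons_append, List.nil_append]
      · by_cases hB : c = ")"
        · subst hB
          rw [embedS_close]
          have hplen := popW_len st (d - 1)
          rw [show out ++ ")" :: (List.replicate (popW st (d - 1)).1 "}"
                ++ embedS s1 (d - 1) (popW st (d - 1)).2)
              = (out ++ [")"]) ++ (List.replicate (popW st (d - 1)).1 "}"
                  ++ embedS s1 (d - 1) (popW st (d - 1)).2) by
            simp only [List.append_assoc, List.cons_append, List.nil_append]]
          rw [show out.length + 1 = (out ++ [")"]).length by simp]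
          rw [aLoop_walk (popW st (d - 1)).1 (out ++ [")"])
            (embedS s1 (d - 1) (popW st (d - 1)).2) _ L (by simp [length_embedS]; omega)]
          rw [show (out ++ [")"]) ++ (List.replicate (popW st (d - 1)).1 "}"
                ++ embedS s1 (d - 1) (popW st (d - 1)).2)
              = ((out ++ [")"]) ++ List.replicate (popW st (d - 1)).1 "}")
                  ++ embedS s1 (d - 1) (popW st (d - 1)).2 by
            simp only [List.append_assoc, List.cons_append, List.nil_append]]
          rw [show (out ++ [")"]).length + (popW st (d - 1)).1
              = ((out ++ [")"]) ++ List.replicate (popW st (d - 1)).1 "}").length by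
            simp <;> omega]
          rw [ih s1 (d - 1) (popW st (d - 1)).2
            ((out ++ [")"]) ++ List.replicate (popW st (d - 1)).1 "}") _ L (by omega)
            (popW_rest_pairwise st (d - 1) hpair)
            (popW_rest_le st (d - 1) hpair)
            (by simp <;> omega)]
          rw [if_neg (by decide), if_pos rfl]
          simp only [List.append_assoc, List.cons_append, List.nil_append]
        · rw [embedS_char c s1 d st hA hB]
          rw [show out ++ c :: embedS s1 d st = (out ++ [c]) ++ embedS s1 d st by
            simp only [List.append_assoc, List.cons_append, List.nil_append]]
          rw [show out.length + 1 = (out ++ [c]).length by simp]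
          rw [ih s1 d st (out ++ [c]) _ L (by omega) hpair hle (by simp <;> omega)]
          rw [if_neg hA, if_neg hB]
          simp only [List.append_assoc, List.cons_append, List.nil_append]

-- ----- B side: the single pass computes FF with each stack entry shifted by one -----

-- B's pop (threshold ≥ e), functionally
def popN (st : List Int) (e : Int) : Nat × List Int :=
  match st with
  | [] => (0, [])
  | t :: r => if t ≥ e then ((popN r e).1 + 1, (popN r e).2) else (0, t :: r)

lemma popW_map_shift (st : List Int) (e : Int) :
    popW (st.map (· + 1)) e = ((popN st e).1, (popN st e).2.map (· + 1)) := by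
  induction st with
  | nil => simp [popW, popN]
  | cons t r ih =>
    by_cases h : t ≥ e
    · rw [List.map_cons, popW, if_pos (by omega : t + 1 > e), ih, popN, if_pos h]
    · rw [List.map_cons, popW, if_neg (by omega : ¬ t + 1 > e), popN, if_neg h, List.map_cons]

lemma bPop_eq (st : List Int) (e : Int) : ∀ out : List String,
    bPop st e out = ((popN st e).2, out ++ List.replicate (popN st e).1 "}") := by
  induction st with
  | nil => intro out; simp [bPop, popN]
  | cons t r ih =>
    intro out
    by_cases h : t ≥ e
    · rw [show bPop (t :: r) e out = bPop r e (out ++ ["}"]) by rw [bPop]; rw [if_pos h]]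
      rw [ih, show popN (t :: r) e = ((popN r e).1 + 1, (popN r e).2) by
        rw [popN]; rw [if_pos h]]
      rw [Prod.mk.injEq]
      refine ⟨rfl, ?_⟩
      rw [List.replicate_succ]
      simp only [List.append_assoc, List.cons_append, List.nil_append]
    · rw [show bPop (t :: r) e out = (t :: r, out) by rw [bPop]; rw [if_neg h]]
      rw [show popN (t :: r) e = (0, t :: r) by rw [popN]; rw [if_neg h]]
      simp

lemma bLoop_stop (text : List String) (n i : Nat) (d : Int) (st : List Int) (out : List String)
    (h : ¬ i < n) : bLoop text n i d st out = out ++ List.replicate st.length "}" := by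
  rw [bLoop, dif_neg h]

-- the well-formedness Pre_ grants, carried along the suffix:
-- every 'log' inside the suffix is followed by '(', and a suffix ending in 'log'
-- can only occur while no '\log{' brace is open
def MidOK (s : List String) : Prop :=
  ∀ (u : List String) (c : String) (v : List String), s = u ++ logChars ++ c :: v → c = "("

def NoMid (s : List String) : Prop :=
  ∀ (u : List String) (c : String) (v : List String), s ≠ u ++ logChars ++ c :: v

def LogInv (s : List String) (st : List Int) : Prop :=
  MidOK s ∧ (∀ u : List String, s = u ++ logChars → st = [] ∧ NoMid s)

lemma midOK_tail (c : String) (s1 : List String) (h : MidOK (c :: s1)) : MidOK s1 := by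
  intro u c' v hv
  exact h (c :: u) c' v (by rw [hv]; simp)

lemma noMid_tail (c : String) (s1 : List String) (h : NoMid (c :: s1)) : NoMid s1 := by
  intro u c' v hv
  exact h (c :: u) c' v (by rw [hv]; simp)

lemma loginv_tail (c : String) (s1 : List String) (st st' : List Int) (h : LogInv (c :: s1) st)
    (hst : st = [] → st' = []) : LogInv s1 st' := by
  refine ⟨midOK_tail c s1 h.1, ?_⟩
  intro u hu
  have h2 := h.2 (c :: u) (by rw [hu]; simp)
  exact ⟨hst h2.1, noMid_tail c s1 h2.2⟩

lemma popN_nil (e : Int) : popN [] e = (0, []) := rfl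

-- B's index loop computes FF of the remaining suffix (stack entries shifted by one)
lemma bridgeB : ∀ (n : Nat) (s pre : List String) (d : Int) (st : List Int) (out : List String)
    (N : Nat), s.length ≤ n → N = pre.length + s.length → LogInv s st →
    bLoop (pre ++ s) N pre.length d st out = out ++ FF s d (st.map (· + 1)) := by
  intro n
  induction n with
  | zero =>
    intro s pre d st out N hn hN _
    have hs : s = [] := List.eq_nil_of_length_eq_zero (by omega)
    subst hs
    rw [bLoop_stop _ _ _ _ _ _ (by simp at hN; omega), FF_nil]
    simp
  | succ n ih =>
    intro s pre d st out N hn hN hinv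
    rcases s with _ | ⟨c, s1⟩
    · rw [bLoop_stop _ _ _ _ _ _ (by simp at hN; omega), FF_nil]
      simp
    simp only [List.length_cons] at hn hN
    have hi : pre.length < N := by omega
    have hslice : PySem.List.slice (pre ++ c :: s1) (some (pre.length : Int))
        (some ((pre.length : Int) + 3)) = (c :: s1).take 3 := slice3 pre (c :: s1)
    by_cases hlog : (c :: s1).take 3 = ["l", "o", "g"]
    · obtain ⟨rfl, h2⟩ := (take3_cons_iff c s1).mp hlog
      rcases s1 with _ | ⟨b, s2⟩
      · simp at h2
      rcases s2 with _ | ⟨g, rest⟩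
      · simp at h2
      have hbg : b = "o" ∧ g = "g" := by
        rw [show (2 : Nat) = 1 + 1 from rfl, List.take_succ_cons,
          show (1 : Nat) = 0 + 1 from rfl, List.take_succ_cons, List.take_zero] at h2
        exact ⟨(List.cons_eq_cons.mp h2).1, (List.cons_eq_cons.mp (List.cons_eq_cons.mp h2).2).1⟩
      obtain ⟨rfl, rfl⟩ := hbg
      simp only [List.length_cons] at hn hN
      rw [bLoop, dif_pos hi, if_pos (by rw [hslice]; exact hlog)]
      rcases rest with _ | ⟨c2, s4⟩
      · -- a bare trailing 'log': LogInv forces the stack to be empty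
        have hst : st = [] := (hinv.2 [] (by rfl)).1
        subst hst
        rw [if_pos (by simp at hN ⊢; omega)]
        rw [bLoop_stop _ _ _ _ _ _ (by simp at hN; omega)]
        rw [FF_log_nil, if_pos (by simp)]
        simp
      · simp only [List.length_cons] at hn hN
        rw [if_neg (by omega)]
        -- the character after this 'log' is '(' by MidOK
        have hc2 : c2 = "(" := hinv.1 [] c2 s4 (by simp [logChars])
        subst hc2
        -- LogInv is preserved: a suffix ending in 'log' here would contradict NoMid
        have hinv' : LogInv ("(" :: s4) (d :: st) := by
          refine ⟨?_, ?_⟩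
          · intro u c' v hv
            exact hinv.1 ("l" :: "o" :: "g" :: u) c' v (by rw [show ("(" :: s4 : List String) = u ++ logChars ++ c' :: v from hv]; simp [logChars])
          · intro u hu
            exfalso
            have hends : ("l" :: "o" :: "g" :: "(" :: s4 : List String)
                = ("l" :: "o" :: "g" :: u) ++ logChars := by rw [show ("(" :: s4 : List String) = u ++ logChars from hu]; simp
            have hnomid := (hinv.2 _ hends).2
            exact hnomid [] "(" s4 (by simp [logChars])
        rw [show pre ++ "l" :: "o" :: "g" :: "(" :: s4
            = (pre ++ ["l", "o", "g"]) ++ "(" :: s4 by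
          simp only [List.append_assoc, List.cons_append, List.nil_append]]
        rw [show pre.length + 3 = (pre ++ ["l", "o", "g"]).length by simp]
        rw [ih ("(" :: s4) (pre ++ ["l", "o", "g"]) d (d :: st)
          (out ++ ["\\", "l", "o", "g", "{"]) N (by simp; omega) (by simp; omega) hinv']
        rw [FF_log_cons, if_pos rfl]
        rw [FF_char "(" s4 d ((d :: st).map (· + 1)) (by simp), if_pos rfl]
        simp only [List.map_cons, List.append_assoc, List.cons_append, List.nil_append]
    · -- ordinary character
      have hnl : ¬(c = "l" ∧ s1.take 2 = ["o", "g"]) :=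
        fun hc => hlog ((take3_cons_iff c s1).mpr hc)
      rw [bLoop, dif_pos hi, if_neg (by rw [hslice]; exact hlog)]
      have hg0 : (pre ++ c :: s1).getD pre.length "" = c := getD_mid pre _ c "" pre.length rfl
      rw [hg0]
      rw [FF_char c s1 d (st.map (· + 1)) hnl]
      rw [show pre ++ c :: s1 = (pre ++ [c]) ++ s1 by simp]
      rw [show pre.length + 1 = (pre ++ [c]).length by simp]
      by_cases hA : c = "("
      · subst hA
        rw [if_pos rfl, if_pos rfl]
        rw [ih s1 (pre ++ ["("]) (d + 1) st (out ++ ["("]) N (by omega) (by simp; omega)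
          (loginv_tail "(" s1 st st hinv (fun h => h))]
        simp only [List.append_assoc, List.cons_append, List.nil_append]
      · by_cases hB : c = ")"
        · subst hB
          rw [if_neg hA, if_pos rfl, if_neg hA, if_pos rfl]
          rw [bPop_eq st (d - 1) (out ++ [")"])]
          rw [popW_map_shift st (d - 1)]
          rw [ih s1 (pre ++ [")"]) (d - 1) (popN st (d - 1)).2
            (out ++ [")"] ++ List.replicate (popN st (d - 1)).1 "}") N (by omega)
            (by simp; omega)
            (loginv_tail ")" s1 st (popN st (d - 1)).2 hinv
              (fun h => by rw [h, popN_nil]))]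
          simp only [List.append_assoc, List.cons_append, List.nil_append]
        · rw [if_neg hA, if_neg hB, if_neg hA, if_neg hB]
          rw [ih s1 (pre ++ [c]) d st (out ++ [c]) N (by omega) (by simp; omega)
            (loginv_tail c s1 st st hinv (fun h => h))]
          simp only [List.append_assoc, List.cons_append, List.nil_append]

-- Pre_ (index form) gives the append-form invariant at the start
lemma occ_index (t u : List String) (c : String) (v : List String)
    (h : t = u ++ logChars ++ c :: v) :
    u.length + 3 < t.length ∧ (t.drop u.length).take 3 = logChars
      ∧ t.getD (u.length + 3) "" = c := by
  subst h
  refine ⟨by simp [logChars], ?_, ?_⟩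
  · rw [List.append_assoc, List.drop_left]
    simp [logChars]
  · rw [show u ++ logChars ++ c :: v = (u ++ logChars) ++ c :: v by simp]
    exact getD_mid (u ++ logChars) v c "" _ (by simp [logChars])

lemma pre_loginv (text : List String) (hpre : Pre_convertLogarithms text) : LogInv text [] := by
  constructor
  · intro u c v hv
    obtain ⟨h1, h2, h3⟩ := occ_index text u c v hv
    rw [← h3]
    exact hpre.1 u.length (by omega) h2 h1
  · intro u hu
    refine ⟨rfl, ?_⟩
    intro u' c' v' hv'
    obtain ⟨h1, h2, h3⟩ := occ_index text u' c' v' hv'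
    have hlen : text.length = u.length + 3 := by rw [hu]; simp [logChars]
    have hdrop : text.drop (text.length - 3) = logChars := by
      rw [hu, show (u ++ logChars).length - 3 = u.length by simp [logChars], List.drop_left]
    exact hpre.2 (by omega) hdrop u'.length (by omega) h1 h2

-- ===== VERDICT (by name: the statement is the Claim_ definition above) =====
theorem convertLogarithms_spec : Claim_equal_convertLogarithms := by
  intro text _ hpre
  show convertLogarithms text = convertLogarithms_alt text
  have hA : convertLogarithms text = FF text 0 [] := by
    unfold convertLogarithms
    have h := main text.length text 0 [] [] text text.length (le_refl _) (by simp) (by simp)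
      (by simp)
    rw [embedS_nilstack text 0] at h
    simpa using h
  have hB : convertLogarithms_alt text = FF text 0 [] := by
    unfold convertLogarithms_alt
    have h := bridgeB text.length text [] 0 [] [] text.length (le_refl _) (by simp)
      (pre_loginv text hpre)
    simpa using h
  rw [hA, hB]
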